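-- pv_equiv track=rewrite | github.com/krsatyam7/niet_codetantra | Competitive programming Levels Wise - CPLW/1. Level 1 - Easy/1.4. Searching and Sorting/1.4.10 Domino’s Pizza.py | minimumTimeToCompleteTheOrder
-- ===== SOURCE A (Python) =====
-- def minimumTimeToCompleteTheOrder(m, ranks):
-- 	def can_make_pizzas_in_time(t):
-- 		total_pizzas = 0
-- 		for r in ranks:
-- 			k = 0
-- 			time_spent = 0
-- 			while True:
-- 				k += 1
-- 				time_spent += k * r
-- 				if time_spent > t:
-- 					break
-- 				total_pizzas += 1
-- 				if total_pizzas >= m: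
-- 					return True
-- 		return total_pizzas >= m
-- 	left, right = 0, max(ranks) * (m * (m + 1)) // 2
-- 	while left < right:
-- 		mid = (left + right) // 2
-- 		if can_make_pizzas_in_time(mid):
-- 			right = mid
-- 		else:
-- 			left = mid + 1
-- 	return left
-- ===== SOURCE B (Python) =====
-- def minimumTimeToCompleteTheOrder(m, ranks):
--     cooks = sorted(ranks)  # fastest cooks first: the m-pizza cap is reached as early as possible
--     def pizzas_within(t):
--         # pizzas producible in time t, summed cook by cook, stopping once m is reached;
--         # per cook the count is found by binary search instead of step-by-step simulation
--         total = 0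
--         for r in cooks:
--             lo, hi = 0, m  # least k in [0, m] with r*(k+1)*(k+2)/2 > t (count capped at m)
--             while lo < hi:
--                 mid = (lo + hi) // 2
--                 if r * (mid + 1) * (mid + 2) > 2 * t:
--                     hi = mid
--                 else:
--                     lo = mid + 1
--             total += lo
--             if total >= m:
--                 break
--         return total
--     lo, hi = 0, max(ranks) * (m * (m + 1)) // 2
--     while lo < hi:
--         mid = (lo + hi) // 2
--         if pizzas_within(mid) >= m:
--             hi = mid
--         else:
--             lo = mid + 1
--     return lo
-- ===== Notes on version B (the rewrite author's own statement) =====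
-- stated objective: faster
-- what changed: B sorts the cooks ascending once and, inside the same outer binary search on the answer, counts each cook's pizzas by a binary search on the closed-form load r*k*(k+1)/2 <= t (capped at m, breaking as soon as m is reached) instead of simulating every cook pizza by pizza.
import Mathlib
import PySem

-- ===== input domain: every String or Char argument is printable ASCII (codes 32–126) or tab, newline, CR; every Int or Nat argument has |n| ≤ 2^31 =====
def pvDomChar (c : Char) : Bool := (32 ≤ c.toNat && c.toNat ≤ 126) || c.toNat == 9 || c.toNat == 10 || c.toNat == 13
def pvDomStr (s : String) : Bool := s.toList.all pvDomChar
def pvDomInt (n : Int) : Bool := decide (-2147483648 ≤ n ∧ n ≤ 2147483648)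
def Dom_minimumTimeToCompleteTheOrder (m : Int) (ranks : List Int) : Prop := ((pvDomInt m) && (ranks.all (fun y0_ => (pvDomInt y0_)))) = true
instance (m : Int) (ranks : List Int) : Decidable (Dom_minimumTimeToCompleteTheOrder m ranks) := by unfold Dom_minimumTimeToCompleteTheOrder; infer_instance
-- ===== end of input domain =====

-- B sorts the cooks ascending once and replaces A's pizza-by-pizza simulation of each
-- cook with a per-cook binary search on the closed-form load r*k*(k+1)/2, capped at m.

-- ===== PORT A =====
-- inner `while True` loop of can_make_pizzas_in_time, state (total_pizzas, k, time_spent);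
-- the augmented assignments k += 1, time_spent += k*r, total_pizzas += 1 are inlined;
-- fuel only makes the loop total (inside Pre_ it always ends within the supplied fuel);
-- none = the `return True` inside the loop, some tot = the `break` with the current total
def pvInnerA (t r m : Int) : Nat → Int → Int → Int → Option Int
  | 0, total, _, _ => some total
  | f + 1, total, k, time =>
    if time + (k + 1) * r > t then some total
    else if m ≤ total + 1 then none
    else pvInnerA t r m f (total + 1) (k + 1) (time + (k + 1) * r)

-- the `for r in ranks` loop of can_make_pizzas_in_time
def pvCanA (t m : Int) : List Int → Int → Bool
  | [], total => decide (m ≤ total)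
  | r :: rs, total =>
    match pvInnerA t r m (t.toNat + m.toNat + 2) total 0 0 with
    | none => true
    | some tot => pvCanA t m rs tot

-- the outer `while left < right` binary search of A, mid = (left+right)//2 inlined
-- (fuel only makes the loop total; it always ends within the supplied fuel)
def pvLoopA (m : Int) (ranks : List Int) : Nat → Int → Int → Int
  | 0, left, _ => left
  | f + 1, left, right =>
    if left < right then
      if pvCanA (PySem.Int.floordiv (left + right) 2) m ranks 0 then
        pvLoopA m ranks f left (PySem.Int.floordiv (left + right) 2)
      else pvLoopA m ranks f (PySem.Int.floordiv (left + right) 2 + 1) right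
    else left

def minimumTimeToCompleteTheOrder (m : Int) (ranks : List Int) : Int :=
  match PySem.List.max? ranks (fun x => x) with
  | none => 0  -- unreachable under Pre_: Python raises ValueError on max([])
  | some mx =>
    pvLoopA m ranks ((PySem.Int.floordiv (mx * (m * (m + 1))) 2).toNat + 1) 0
      (PySem.Int.floordiv (mx * (m * (m + 1))) 2)

-- ===== PORT B =====
-- per-cook `while lo < hi` binary search of pizzas_within: least k in [0, m] with
-- r*(k+1)*(k+2) > 2*t; mid = (lo+hi)//2 inlined (fuel only makes the loop total)
def pvCntB (t r : Int) : Nat → Int → Int → Int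
  | 0, lo, _ => lo
  | f + 1, lo, hi =>
    if lo < hi then
      if r * (PySem.Int.floordiv (lo + hi) 2 + 1) * (PySem.Int.floordiv (lo + hi) 2 + 2) > 2 * t then
        pvCntB t r f lo (PySem.Int.floordiv (lo + hi) 2)
      else pvCntB t r f (PySem.Int.floordiv (lo + hi) 2 + 1) hi
    else lo

-- the `for r in ranks` loop of pizzas_within (`break` then `return total` = return it now)
def pvCountB (t m : Int) : List Int → Int → Int
  | [], total => total
  | r :: rs, total =>
    if m ≤ total + pvCntB t r (m.toNat + 1) 0 m then total + pvCntB t r (m.toNat + 1) 0 m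
    else pvCountB t m rs (total + pvCntB t r (m.toNat + 1) 0 m)

-- the outer `while lo < hi` binary search of B, mid inlined (fuel only makes it total)
def pvLoopB (m : Int) (ranks : List Int) : Nat → Int → Int → Int
  | 0, lo, _ => lo
  | f + 1, lo, hi =>
    if lo < hi then
      if m ≤ pvCountB (PySem.Int.floordiv (lo + hi) 2) m ranks 0 then
        pvLoopB m ranks f lo (PySem.Int.floordiv (lo + hi) 2)
      else pvLoopB m ranks f (PySem.Int.floordiv (lo + hi) 2 + 1) hi
    else lo

def minimumTimeToCompleteTheOrder_alt (m : Int) (ranks : List Int) : Int :=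
  -- cooks = sorted(ranks), computed once before the search
  match PySem.List.max? ranks (fun x => x) with
  | none => 0  -- unreachable under Pre_: Python raises ValueError on max([])
  | some mx =>
    pvLoopB m (PySem.List.sorted ranks (fun x => x) false)
      ((PySem.Int.floordiv (mx * (m * (m + 1))) 2).toNat + 1) 0
      (PySem.Int.floordiv (mx * (m * (m + 1))) 2)

-- ===== PRECONDITION & SPEC =====
-- Pre_ excludes only the empty rank list, on which Python's max(ranks) raises ValueError.
def Pre_minimumTimeToCompleteTheOrder (m : Int) (ranks : List Int) : Prop := ranks ≠ []
instance (m : Int) (ranks : List Int) : Decidable (Pre_minimumTimeToCompleteTheOrder m ranks) := by unfold Pre_minimumTimeToCompleteTheOrder; infer_instance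

def pvWitness_minimumTimeToCompleteTheOrder : Int × List Int := (3, [2, 1])

def Spec_minimumTimeToCompleteTheOrder (m : Int) (ranks : List Int) (out : Int) : Prop := out = minimumTimeToCompleteTheOrder_alt m ranks
instance (m : Int) (ranks : List Int) (out : Int) : Decidable (Spec_minimumTimeToCompleteTheOrder m ranks out) := by unfold Spec_minimumTimeToCompleteTheOrder; infer_instance

-- ===== CLAIM (what is proved, stated in full; the proofs are below) =====
def Claim_equal_minimumTimeToCompleteTheOrder : Prop := ∀ (m : Int) (ranks : List Int), Dom_minimumTimeToCompleteTheOrder m ranks → Pre_minimumTimeToCompleteTheOrder m ranks → Spec_minimumTimeToCompleteTheOrder m ranks (minimumTimeToCompleteTheOrder m ranks)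

-- ===== LEMMAS AND PROOFS =====

-- the per-cook predicate "a cook of rank r cannot make k+1 pizzas within t", i.e.
-- r*(k+1)*(k+2) > 2*t, is monotone in k ≥ 0 whenever 0 ≤ t (any r)
theorem pvP_mono (r t j k : Int) (ht : 0 ≤ t) (hj : 0 ≤ j) (hjk : j ≤ k)
    (h : r * (k + 1) * (k + 2) ≤ 2 * t) : r * (j + 1) * (j + 2) ≤ 2 * t := by
  by_cases hr : r ≤ 0
  · nlinarith [mul_nonneg (show (0:Int) ≤ j + 1 by omega) (show (0:Int) ≤ j + 2 by omega)]
  · have hr' : 0 < r := by omega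
    nlinarith [mul_nonneg (le_of_lt hr')
      (show (0:Int) ≤ (k + 1) * (k + 2) - (j + 1) * (j + 2) by nlinarith)]

-- characterisation of B's per-cook binary search
theorem pvCntB_spec (t r m : Int) (ht : 0 ≤ t) :
    ∀ (f : Nat) (lo hi : Int), 0 ≤ lo → lo ≤ hi → hi ≤ m →
    (∀ j, 0 ≤ j → j < lo → r * (j + 1) * (j + 2) ≤ 2 * t) →
    (hi < m → r * (hi + 1) * (hi + 2) > 2 * t) →
    (hi - lo).toNat < f →
    0 ≤ pvCntB t r f lo hi ∧ pvCntB t r f lo hi ≤ m ∧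
    (∀ j, 0 ≤ j → j < pvCntB t r f lo hi → r * (j + 1) * (j + 2) ≤ 2 * t) ∧
    (pvCntB t r f lo hi < m → r * (pvCntB t r f lo hi + 1) * (pvCntB t r f lo hi + 2) > 2 * t) := by
  intro f
  induction f with
  | zero => intro lo hi _ _ _ _ _ hf; omega
  | succ f ih =>
    intro lo hi h0 hlh hhm hlow hhigh hf
    rw [pvCntB]
    by_cases hlt : lo < hi
    · rw [if_pos hlt]
      have hb := PySem.Int.floordiv_two_mid_bounds (le_of_lt hlt)
      have hmidlt : PySem.Int.floordiv (lo + hi) 2 < hi := by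
        rw [PySem.Int.floordiv_lt_iff_lt_mul (by norm_num)]; omega
      by_cases hp : r * (PySem.Int.floordiv (lo + hi) 2 + 1) * (PySem.Int.floordiv (lo + hi) 2 + 2) > 2 * t
      · rw [if_pos hp]
        exact ih lo _ h0 hb.1 (by omega) hlow (fun _ => hp) (by omega)
      · rw [if_neg hp]
        refine ih _ hi (by omega) (by omega) hhm ?_ hhigh (by omega)
        intro j hj hjm
        exact pvP_mono r t j _ ht hj (by omega) (not_lt.mp hp)
    · rw [if_neg hlt]
      have heq : lo = hi := by omega
      exact ⟨h0, by omega, hlow, by rw [heq]; exact hhigh⟩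

-- if A's inner loop finishes the cook normally, the running total has not decreased
theorem pvInnerA_some_le (t r m : Int) :
    ∀ (f : Nat) (tot k time tot' : Int),
    pvInnerA t r m f tot k time = some tot' → tot ≤ tot' := by
  intro f
  induction f with
  | zero => intro tot k time tot' h; simp [pvInnerA] at h; omega
  | succ f ih =>
    intro tot k time tot' h
    rw [pvInnerA] at h
    by_cases h1 : time + (k + 1) * r > t
    · rw [if_pos h1] at h; simp at h; omega
    · rw [if_neg h1] at h
      by_cases h2 : m ≤ tot + 1
      · simp [h2] at h
      · rw [if_neg h2] at h
        have := ih (tot + 1) (k + 1) (time + (k + 1) * r) tot' h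
        omega

-- characterisation of A's inner loop in terms of any c satisfying B's search spec
theorem pvInnerA_char (t r m c : Int)
    (hc0 : 0 ≤ c) (hcm : c ≤ m)
    (hlow : ∀ j, 0 ≤ j → j < c → r * (j + 1) * (j + 2) ≤ 2 * t)
    (hhigh : c < m → r * (c + 1) * (c + 2) > 2 * t) :
    ∀ (f : Nat) (k tot time : Int), 0 ≤ k → k ≤ c → k ≤ tot → tot < m →
    2 * time = r * k * (k + 1) → (c - k).toNat < f →
    pvInnerA t r m f tot k time =
      (if 1 ≤ c - k ∧ m ≤ tot + (c - k) then none else some (tot + (c - k))) := by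
  intro f
  induction f with
  | zero => intro k tot time _ _ _ _ _ hf; omega
  | succ f ih =>
    intro k tot time hk0 hkc hktot htotm htime hf
    rw [pvInnerA]
    have htime' : 2 * (time + (k + 1) * r) = r * (k + 1) * (k + 2) := by nlinarith [htime]
    by_cases hbr : time + (k + 1) * r > t
    · -- the loop breaks here: the predicate holds at k, so k = c
      have hkc' : k = c := by
        by_contra hne
        have hklt : k < c := by omega
        have := hlow k hk0 hklt
        linarith
      rw [if_pos hbr]
      have hz : c - k = 0 := by omega
      rw [hz, if_neg (by omega : ¬ (1 ≤ (0:Int) ∧ m ≤ tot + 0))]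
      norm_num
    · -- a pizza is made: the predicate fails at k, so k < c
      have hklt : k < c := by
        by_contra hge
        have hkeq : k = c := by omega
        rcases (by omega : c < m ∨ m ≤ c) with hcm' | hcm'
        · have hp := hhigh hcm'
          subst hkeq
          linarith
        · omega
      rw [if_neg hbr]
      by_cases hm1 : m ≤ tot + 1
      · rw [if_pos hm1, if_pos (by constructor <;> omega)]
      · rw [if_neg hm1]
        rw [ih (k + 1) (tot + 1) (time + (k + 1) * r) (by omega) (by omega)
          (by omega) (by omega) (by nlinarith [htime]) (by omega)]
        by_cases hcnd : 1 ≤ c - (k + 1) ∧ m ≤ tot + 1 + (c - (k + 1))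
        · rw [if_pos hcnd, if_pos (by constructor <;> omega)]
        · rw [if_neg hcnd, if_neg (by omega)]
          congr 1
          omega

-- with m ≤ tot the A-side for-loop always answers true
theorem pvCanA_of_le (t m : Int) :
    ∀ (rs : List Int) (tot : Int), m ≤ tot → pvCanA t m rs tot = true := by
  intro rs
  induction rs with
  | nil => intro tot h; simp [pvCanA, h]
  | cons r rs ih =>
    intro tot h
    rw [pvCanA]
    cases hinner : pvInnerA t r m (t.toNat + m.toNat + 2) tot 0 0 with
    | none => rfl
    | some tot' =>
      exact ih tot' (le_trans h (pvInnerA_some_le t r m _ tot 0 0 tot' hinner))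

-- the per-cook capped count that B's binary search computes, summed over the cooks;
-- the feasibility predicates of both programs reduce to "m <= tot + pvS", which is
-- invariant under B's reordering of the cooks
def pvS (t m : Int) (rs : List Int) : Int :=
  (rs.map (fun r => pvCntB t r (m.toNat + 1) 0 m)).sum

theorem pvCntB_nonneg (t r m : Int) (ht : 0 ≤ t) : 0 ≤ pvCntB t r (m.toNat + 1) 0 m := by
  by_cases hm : m ≤ 0
  · have hmt : m.toNat = 0 := by omega
    rw [hmt, pvCntB, if_neg (by omega : ¬ (0:Int) < m)]
  · exact (pvCntB_spec t r m ht (m.toNat + 1) 0 m le_rfl (by omega) le_rfl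
      (by intro j hj hjl; omega) (by intro h; omega) (by omega)).1

theorem pvS_nonneg (t m : Int) (ht : 0 ≤ t) (rs : List Int) : 0 ≤ pvS t m rs := by
  induction rs with
  | nil => simp [pvS]
  | cons r rs ih =>
    have := pvCntB_nonneg t r m ht
    simp only [pvS, List.map_cons, List.sum_cons] at ih ⊢
    omega

theorem pvS_cons (t m r : Int) (rs : List Int) :
    pvS t m (r :: rs) = pvCntB t r (m.toNat + 1) 0 m + pvS t m rs := by
  simp [pvS]

-- A's for-loop answers exactly "m ≤ tot + pvS" (m ≥ 1)
theorem pvCanA_iff (m t : Int) (ht : 0 ≤ t) (hm : 1 ≤ m) :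
    ∀ (rs : List Int) (tot : Int), 0 ≤ tot → tot < m →
    pvCanA t m rs tot = decide (m ≤ tot + pvS t m rs) := by
  intro rs
  induction rs with
  | nil => intro tot _ _; rw [pvCanA]; simp [pvS]
  | cons r rs ih =>
    intro tot htot0 htotm
    obtain ⟨hc0, hcm, hlow, hhigh⟩ := pvCntB_spec t r m ht (m.toNat + 1) 0 m le_rfl
      (by omega) le_rfl (by intro j hj hjl; omega) (by intro h; omega) (by omega)
    have hinner := pvInnerA_char t r m (pvCntB t r (m.toNat + 1) 0 m) hc0 hcm hlow hhigh
      (t.toNat + m.toNat + 2) 0 tot 0 le_rfl hc0 htot0 htotm (by ring) (by omega)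
    rw [sub_zero] at hinner
    have hS := pvS_nonneg t m ht rs
    rw [pvCanA, pvS_cons]
    by_cases hcond : 1 ≤ pvCntB t r (m.toNat + 1) 0 m ∧ m ≤ tot + pvCntB t r (m.toNat + 1) 0 m
    · rw [if_pos hcond] at hinner
      rw [hinner]
      have : m ≤ tot + (pvCntB t r (m.toNat + 1) 0 m + pvS t m rs) := by omega
      simp [this]
    · rw [if_neg hcond] at hinner
      simp only [hinner]
      have htc : tot + pvCntB t r (m.toNat + 1) 0 m < m := by
        by_contra hge
        exact hcond ⟨by omega, by omega⟩
      rw [ih (tot + pvCntB t r (m.toNat + 1) 0 m) (by omega) htc]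
      exact decide_eq_decide.mpr (by omega)

-- B's for-loop compares against m exactly as "m ≤ tot + pvS" (any m)
theorem pvCountB_iff (m t : Int) (ht : 0 ≤ t) :
    ∀ (rs : List Int) (tot : Int),
    (m ≤ pvCountB t m rs tot) ↔ (m ≤ tot + pvS t m rs) := by
  intro rs
  induction rs with
  | nil => intro tot; rw [pvCountB]; simp [pvS]
  | cons r rs ih =>
    intro tot
    have hc0 := pvCntB_nonneg t r m ht
    have hS := pvS_nonneg t m ht rs
    rw [pvCountB, pvS_cons]
    by_cases hcond : m ≤ tot + pvCntB t r (m.toNat + 1) 0 m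
    · rw [if_pos hcond]
      constructor <;> intro _ <;> omega
    · rw [if_neg hcond, ih (tot + pvCntB t r (m.toNat + 1) 0 m)]
      constructor <;> intro h <;> omega

-- the feasibility predicates agree: A scans ranks in the given order, B in sorted
-- order, but both reduce to "m ≤ pvS", a sum invariant under the permutation
theorem pvPred_eq (m t : Int) (ht : 0 ≤ t) (ranks : List Int) :
    pvCanA t m ranks 0 =
      decide (m ≤ pvCountB t m (PySem.List.sorted ranks (fun x => x) false) 0) := by
  have hperm : pvS t m (PySem.List.sorted ranks (fun x => x) false) = pvS t m ranks := by
    unfold pvS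
    exact List.Perm.sum_eq (List.Perm.map _ (PySem.List.sorted_perm ranks (fun x => x) false))
  by_cases hm : m ≤ 0
  · rw [pvCanA_of_le t m ranks 0 hm]
    have := pvS_nonneg t m ht (PySem.List.sorted ranks (fun x => x) false)
    have : m ≤ pvCountB t m (PySem.List.sorted ranks (fun x => x) false) 0 := by
      rw [pvCountB_iff m t ht]
      omega
    simp [this]
  · rw [pvCanA_iff m t ht (by omega) ranks 0 le_rfl (by omega)]
    have h2 : (m ≤ pvCountB t m (PySem.List.sorted ranks (fun x => x) false) 0) ↔
        (m ≤ 0 + pvS t m ranks) := by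
      rw [pvCountB_iff m t ht, hperm]
    simp only [zero_add] at h2 ⊢
    exact (decide_eq_decide.mpr h2.symm)

-- the two outer binary searches agree
theorem pvLoop_eq (m : Int) (ranks : List Int) :
    ∀ (f : Nat) (lo hi : Int), 0 ≤ lo →
    pvLoopA m ranks f lo hi =
      pvLoopB m (PySem.List.sorted ranks (fun x => x) false) f lo hi := by
  intro f
  induction f with
  | zero => intro lo hi _; rfl
  | succ f ih =>
    intro lo hi h0
    rw [pvLoopA, pvLoopB]
    by_cases hlt : lo < hi
    · rw [if_pos hlt, if_pos hlt]
      have hb := PySem.Int.floordiv_two_mid_bounds (le_of_lt hlt)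
      rw [pvPred_eq m (PySem.Int.floordiv (lo + hi) 2) (by omega) ranks]
      set rs := PySem.List.sorted ranks (fun x => x) false with hrs
      by_cases hcan : m ≤ pvCountB (PySem.Int.floordiv (lo + hi) 2) m rs 0
      · rw [if_pos (by simpa using hcan), if_pos hcan]
        exact ih lo _ h0
      · rw [if_neg (by simpa using hcan), if_neg hcan]
        exact ih _ hi (by omega)
    · rw [if_neg hlt, if_neg hlt]

-- ===== VERDICT (by name: the statement is the Claim_ definition above) =====
theorem minimumTimeToCompleteTheOrder_spec : Claim_equal_minimumTimeToCompleteTheOrder := by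
  intro m ranks _ _
  unfold Spec_minimumTimeToCompleteTheOrder
  unfold minimumTimeToCompleteTheOrder minimumTimeToCompleteTheOrder_alt
  cases h : PySem.List.max? ranks (fun x => x) with
  | none => rfl
  | some mx => exact pvLoop_eq m ranks _ 0 _ le_rfl
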